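-- pv_equiv track=rewrite | github.com/AlexanderWong087/Python-Practice | list_and_strings/ubbidubbi.py | ubbidubbi_word
-- ===== SOURCE A (Python) =====
-- import string
--
-- def ubbidubbi_word(eword):
--     vowels = 'aeiouy'
--     result = []
--     i = 0
--     length = len(eword)
--     punctuation = ''
--     while i < length and eword[i] in string.punctuation:
--         punctuation += eword[i]
--         i += 1
--     if punctuation:
--         eword = eword[:-len(punctuation)]
--     while i < length:
--         if eword[i] in vowels:
--             start = i
--             while i < length and eword[i] in vowels:
--                 i += 1
--             result.append('ub' + eword[start:i])
--         else:
--             result.append(eword[i])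
--             i += 1
--     if result and result[-1] == 'ub' and eword.endswith('e'):
--         result.pop()
--     return ''.join(result) + punctuation
-- ===== SOURCE B (Python) =====
-- from itertools import groupby
--
-- def ubbidubbi_word(eword):
--     return ''.join(('ub' if is_vowel else '') + ''.join(run)
--                    for is_vowel, run in groupby(eword, key=lambda c: c in 'aeiouy'))
-- ===== Notes on version B (the rewrite author's own statement) =====
-- stated objective: idiomatic
-- what changed: Replaced A's two nested index-based while loops (manual vowel-run scanning with slicing, plus a dead final pop branch that can never fire) by a single itertools.groupby pass that prefixes each maximal vowel run.
import Mathlib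
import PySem

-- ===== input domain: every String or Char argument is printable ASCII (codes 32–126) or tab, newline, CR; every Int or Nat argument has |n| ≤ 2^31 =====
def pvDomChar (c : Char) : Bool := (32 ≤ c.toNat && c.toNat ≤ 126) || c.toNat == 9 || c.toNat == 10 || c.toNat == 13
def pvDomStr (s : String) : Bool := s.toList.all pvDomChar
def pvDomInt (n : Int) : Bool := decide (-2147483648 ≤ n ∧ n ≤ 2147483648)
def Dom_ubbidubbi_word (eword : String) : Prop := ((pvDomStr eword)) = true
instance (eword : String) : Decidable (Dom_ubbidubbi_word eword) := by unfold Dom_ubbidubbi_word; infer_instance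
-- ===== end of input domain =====

-- B replaces A's two nested index-based while loops by a single itertools.groupby pass over
-- maximal vowel/non-vowel runs (objective: idiomatic); A's dead trailing-'ub' pop is dropped.

-- ===== PORT A =====
def pvVowels : List Char := ['a', 'e', 'i', 'o', 'u', 'y']
def pvPunct : List Char := "!\"#$%&'()*+,-./:;<=>?@[\\]^_`{|}~".toList

-- first while loop: collect leading punctuation
def pvA_punctLoop : List Char → List Char
  | [] => []
  | c :: cs => if pvPunct.contains c then c :: pvA_punctLoop cs else []

-- inner while loop: advance i while eword[i] is a vowel
def pvA_scan (ew : List Char) (length i : Nat) : Nat :=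
  if _h : i < length then
    match ew[i]? with
    | some c => if pvVowels.contains c then pvA_scan ew length (i + 1) else i
    | none => i          -- Python raises IndexError here; unreachable under Pre_
  else i
termination_by length - i

theorem pvA_scan_ge (ew : List Char) (length i : Nat) : i ≤ pvA_scan ew length i := by
  fun_induction pvA_scan ew length i <;> omega

theorem pvA_scan_gt (ew : List Char) (length i : Nat) (h : i < length) (c : Char)
    (hc : ew[i]? = some c) (hv : pvVowels.contains c = true) : i < pvA_scan ew length i := by
  rw [pvA_scan]
  simp only [h, dif_pos, hc, hv, if_pos]
  exact Nat.lt_of_lt_of_le (Nat.lt_succ_self i) (pvA_scan_ge ew length (i + 1))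

-- second while loop over i, accumulating result (strings as List Char; join = flatten)
def pvA_loop2 (ew : List Char) (length i : Nat) (result : List (List Char)) : List (List Char) :=
  if h : i < length then
    match hc : ew[i]? with
    | none => result     -- Python raises IndexError here; unreachable under Pre_
    | some c =>
      if hv : pvVowels.contains c then
        pvA_loop2 ew length (pvA_scan ew length i)
          (result ++ [['u', 'b'] ++ PySem.List.slice ew (some (i : Int)) (some ((pvA_scan ew length i : Nat) : Int))])
      else
        pvA_loop2 ew length (i + 1) (result ++ [[c]])
  else result
termination_by length - i
decreasing_by
  · have := pvA_scan_gt ew length i h c hc hv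
    omega
  · omega

def ubbidubbi_word (eword : String) : String :=
  let s := eword.toList
  let length := s.length
  let punctuation := pvA_punctLoop s
  let i := punctuation.length
  let ew := if punctuation ≠ [] then PySem.List.slice s none (some (-(punctuation.length : Int))) else s
  let result := pvA_loop2 ew length i []
  let result :=
    if result ≠ [] ∧ result.getLast?.getD [] = ['u', 'b'] ∧ PySem.Chars.endswith ew ['e']
    then result.dropLast else result
  String.ofList (result.flatten ++ punctuation)

-- ===== PORT B =====
-- groupby on key (c in 'aeiouy'): one maximal run per step
def pvAlt_go : List Char → List Char
  | [] => []
  | c :: cs =>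
    let v := pvVowels.contains c
    (if v then ['u', 'b'] else []) ++ (c :: cs).takeWhile (fun d => pvVowels.contains d == v)
      ++ pvAlt_go ((c :: cs).dropWhile (fun d => pvVowels.contains d == v))
termination_by l => l.length
decreasing_by
  simp only [List.dropWhile_cons, beq_self_eq_true, if_true, List.length_cons]
  exact Nat.lt_succ_of_le (List.length_dropWhile_le _ _)

def ubbidubbi_word_alt (eword : String) : String := String.ofList (pvAlt_go eword.toList)

-- ===== PRECONDITION & SPEC =====
-- Pre_ excludes exactly the inputs where A raises IndexError: strings with a non-empty proper
-- prefix of punctuation (A truncates the string from the END and then indexes past it).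
def Pre_ubbidubbi_word (eword : String) : Prop :=
  eword.toList.takeWhile (fun c => pvPunct.contains c) = [] ∨
    eword.toList.all (fun c => pvPunct.contains c)
instance (eword : String) : Decidable (Pre_ubbidubbi_word eword) := by
  unfold Pre_ubbidubbi_word; infer_instance
def pvWitness_ubbidubbi_word : String := "hello"

def Spec_ubbidubbi_word (eword : String) (out : String) : Prop := out = ubbidubbi_word_alt eword
instance (eword : String) (out : String) : Decidable (Spec_ubbidubbi_word eword out) := by
  unfold Spec_ubbidubbi_word; infer_instance

-- ===== CLAIM (what is proved, stated in full; the proofs are below) =====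
def Claim_equal_ubbidubbi_word : Prop := ∀ (eword : String), Dom_ubbidubbi_word eword → Pre_ubbidubbi_word eword → Spec_ubbidubbi_word eword (ubbidubbi_word eword)

-- ===== LEMMAS AND PROOFS =====

theorem pvA_scan_char (l : List Char) (i : Nat) :
    pvA_scan l l.length i = i + ((l.drop i).takeWhile (fun d => pvVowels.contains d)).length := by
  fun_induction pvA_scan l l.length i with
  | case1 i h c hc hv ih =>
    have hc' : l[i] = c := by simpa [List.getElem?_eq_getElem h] using hc
    rw [List.drop_eq_getElem_cons h, hc', List.takeWhile_cons, hv]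
    simp only [if_true, List.length_cons]
    omega
  | case2 i h c hc hv =>
    have hc' : l[i] = c := by simpa [List.getElem?_eq_getElem h] using hc
    have hv' : pvVowels.contains c = false := by simpa using hv
    rw [List.drop_eq_getElem_cons h, hc', List.takeWhile_cons, hv']
    simp
  | case3 i h hc =>
    exact absurd hc (by simp [List.getElem?_eq_getElem h])
  | case4 i h =>
    rw [List.drop_eq_nil_of_le (by omega)]
    simp

theorem pvAlt_go_nil : pvAlt_go [] = [] := by rw [pvAlt_go]

theorem pvAlt_go_cons_notVowel (c : Char) (cs : List Char) (h : pvVowels.contains c = false) :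
    pvAlt_go (c :: cs) = c :: pvAlt_go cs := by
  have hm : c ∉ pvVowels := by simpa using h
  match cs with
  | [] => simp [pvAlt_go, hm, pvAlt_go_nil]
  | d :: ds =>
    by_cases hd : d ∈ pvVowels
    · rw [pvAlt_go]
      simp [List.takeWhile_cons, List.dropWhile_cons, hm, hd]
    · rw [pvAlt_go, pvAlt_go]
      simp [List.takeWhile_cons, List.dropWhile_cons, hm, hd]

theorem pvA_loop2_flatten (l : List Char) (i : Nat) (res : List (List Char)) :
    (pvA_loop2 l l.length i res).flatten = res.flatten ++ pvAlt_go (l.drop i) := by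
  fun_induction pvA_loop2 l l.length i res with
  | case1 i res h hc =>
    exact absurd hc (by simp [List.getElem?_eq_getElem h])
  | case2 i res h c hc hv ih =>
    have hc' : l[i] = c := by simpa [List.getElem?_eq_getElem h] using hc
    have hd : l.drop i = c :: l.drop (i + 1) := by rw [List.drop_eq_getElem_cons h, hc']
    set t := (l.drop i).takeWhile (fun d => pvVowels.contains d) with ht
    have hsplit : t ++ (l.drop i).dropWhile (fun d => pvVowels.contains d) = l.drop i :=
      List.takeWhile_append_dropWhile
    have hscan : pvA_scan l l.length i = i + t.length := pvA_scan_char l i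
    have hslice : PySem.List.slice l (some (i : Int)) (some ((pvA_scan l l.length i : Nat) : Int)) = t := by
      rw [hscan]
      push_cast
      rw [PySem.List.slice_natCast_add]
      exact (List.prefix_iff_eq_take.mp (List.takeWhile_prefix _)).symm
    have hdropj : l.drop (pvA_scan l l.length i) = (l.drop i).dropWhile (fun d => pvVowels.contains d) := by
      have h2 := congrArg (List.drop t.length) hsplit
      rw [List.drop_left' rfl] at h2
      rw [hscan, ← List.drop_drop, h2, List.drop_drop]
    rw [ih, hslice, hdropj]
    rw [hd, pvAlt_go]
    simp only [hv, if_true]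
    have htw : (c :: l.drop (i+1)).takeWhile (fun d => pvVowels.contains d == true)
        = t := by rw [ht, hd]; simp
    have hdw : (c :: l.drop (i+1)).dropWhile (fun d => pvVowels.contains d == true)
        = (l.drop i).dropWhile (fun d => pvVowels.contains d) := by rw [hd]; simp
    rw [htw, hdw]
    simp
    rw [hd]
  | case3 i res h c hc hv ih =>
    have hc' : l[i] = c := by simpa [List.getElem?_eq_getElem h] using hc
    have hv' : pvVowels.contains c = false := by simpa using hv
    have hd : l.drop i = c :: l.drop (i + 1) := by rw [List.drop_eq_getElem_cons h, hc']
    rw [ih, hd, pvAlt_go_cons_notVowel c _ hv']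
    simp
  | case4 i res h =>
    rw [List.drop_eq_nil_of_le (by omega), pvAlt_go_nil]
    simp

theorem pvA_loop2_no_ub (l : List Char) (i : Nat) (res : List (List Char))
    (hres : ∀ x ∈ res, x ≠ ['u', 'b']) :
    ∀ x ∈ pvA_loop2 l l.length i res, x ≠ ['u', 'b'] := by
  fun_induction pvA_loop2 l l.length i res with
  | case1 i res h hc => exact hres
  | case2 i res h c hc hv ih =>
    apply ih
    intro x hx
    rcases List.mem_append.mp hx with hx | hx
    · exact hres x hx
    · have hc' : l[i] = c := by simpa [List.getElem?_eq_getElem h] using hc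
      have hd : l.drop i = c :: l.drop (i + 1) := by rw [List.drop_eq_getElem_cons h, hc']
      have hscan : pvA_scan l l.length i = i + ((l.drop i).takeWhile (fun d => pvVowels.contains d)).length :=
        pvA_scan_char l i
      have hslice : PySem.List.slice l (some (i : Int)) (some ((pvA_scan l l.length i : Nat) : Int))
          = (l.drop i).takeWhile (fun d => pvVowels.contains d) := by
        rw [hscan]
        push_cast
        rw [PySem.List.slice_natCast_add]
        exact (List.prefix_iff_eq_take.mp (List.takeWhile_prefix _)).symm
      have htw : (l.drop i).takeWhile (fun d => pvVowels.contains d)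
          = c :: (l.drop (i+1)).takeWhile (fun d => pvVowels.contains d) := by
        rw [hd, List.takeWhile_cons, hv]; simp
      simp only [List.mem_singleton] at hx
      subst hx
      rw [hslice, htw]
      simp
  | case3 i res h c hc hv ih =>
    apply ih
    intro x hx
    rcases List.mem_append.mp hx with hx | hx
    · exact hres x hx
    · simp only [List.mem_singleton] at hx
      subst hx
      simp
  | case4 i res h => exact hres

theorem pvA_punctLoop_eq (l : List Char) :
    pvA_punctLoop l = l.takeWhile (fun c => pvPunct.contains c) := by
  induction l with
  | nil => rfl
  | cons c cs ih => simp [pvA_punctLoop, List.takeWhile_cons, ih]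

theorem pvPunct_not_vowel (c : Char) (h : pvPunct.contains c = true) :
    pvVowels.contains c = false := by
  have hall : pvPunct.all (fun c => !(pvVowels.contains c)) = true := by decide
  have := List.all_eq_true.mp hall c (by simpa using h)
  simpa using this

theorem pvAlt_go_no_vowel (l : List Char) (h : ∀ c ∈ l, pvVowels.contains c = false) :
    pvAlt_go l = l := by
  match l with
  | [] => exact pvAlt_go_nil
  | c :: cs =>
    rw [pvAlt_go_cons_notVowel c cs (h c (by simp))]
    rw [pvAlt_go_no_vowel cs (fun x hx => h x (by simp [hx]))]

-- ===== VERDICT (by name: the statement is the Claim_ definition above) =====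
theorem pvPre_all_not_vowel (l : List Char) (hp : l.all (fun c => pvPunct.contains c) = true) :
    ∀ c ∈ l, pvVowels.contains c = false :=
  fun c hc => pvPunct_not_vowel c (List.all_eq_true.mp hp c hc)

theorem ubbidubbi_word_spec : Claim_equal_ubbidubbi_word := by
  intro eword _ hpre
  unfold Spec_ubbidubbi_word ubbidubbi_word ubbidubbi_word_alt
  dsimp only
  rw [pvA_punctLoop_eq]
  rcases hpre with hp | hp
  · -- no leading punctuation
    rw [hp]
    simp only [ne_eq, not_true_eq_false, if_false, List.length_nil]
    have hub := pvA_loop2_no_ub eword.toList 0 [] (by simp)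
    have hcond : ¬((pvA_loop2 eword.toList eword.toList.length 0 [] ≠ [] ∧
        (pvA_loop2 eword.toList eword.toList.length 0 []).getLast?.getD [] = ['u', 'b'] ∧
        PySem.Chars.endswith eword.toList ['e'])) := by
      rintro ⟨h1, h2, _⟩
      cases hL : (pvA_loop2 eword.toList eword.toList.length 0 []).getLast? with
      | none => exact h1 (List.getLast?_eq_none_iff.mp hL)
      | some x =>
        rw [hL] at h2
        simp only [Option.getD_some] at h2
        exact hub x (List.mem_of_getLast? hL) h2
    rw [if_neg hcond]
    have hfl := pvA_loop2_flatten eword.toList 0 []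
    simp only [List.drop_zero, List.flatten_nil, List.nil_append] at hfl
    rw [hfl]
    simp
  · -- the whole string is punctuation
    have htw : eword.toList.takeWhile (fun c => pvPunct.contains c) = eword.toList :=
      List.takeWhile_eq_self_iff.mpr (fun c hc => List.all_eq_true.mp hp c hc)
    have hnv := pvPre_all_not_vowel eword.toList hp
    rw [htw]
    by_cases hs : eword.toList = []
    · rw [hs]
      simp only [ne_eq, not_true_eq_false, if_false, List.length_nil]
      rw [pvA_loop2]
      simp [pvAlt_go_nil]
    · rw [if_pos hs]
      rw [PySem.List.slice_to_neg_natCast _ _ (by simpa using List.length_pos_iff.mpr hs)]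
      simp only [Nat.sub_self, List.take_zero]
      rw [pvA_loop2]
      simp only [lt_self_iff_false, dif_neg, not_false_eq_true]
      simp only [ne_eq, not_true_eq_false, List.getLast?_nil, false_and, if_false]
      rw [pvAlt_go_no_vowel eword.toList hnv]
      simp
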